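-- pv_equiv track=rewrite | github.com/Ratabart666/Ratabart666 | programación científica y ciencia de datos/métodos númericos/Actividad 5(matrices).py | matriz_aum_id
-- ===== SOURCE A (Python) =====
-- def matriz_vacia(n,m):
--     '''Ingresados los valores deseados de columnas y filas
--         retorna una matriz vacía de nxm
--     Parametros:
--         n: numero de filas
--         m: numero de columnas
--     Retorno:
--         Matriz vacia de nxm
--     '''
--     vacia=[]
--     for i in range(0,n):
--          vacia.append([])
--     for j in vacia:
--          for k in range(0,m):
--              j.append(0)
--     return vacia
--
-- def matriz_aum_id(A):
--     '''Dada una matriz cuadrada a, retorna una matriz aumentada con la identidad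
--     Parametros:
--         A:matriz
--     Retorno
--         Matriz aumentada con la identidad'''
--     new=matriz_vacia(len(A),2*len(A))
--     for i in range(len(A)):
--         for j in range(len(A)):
--             new[i][j]=A[i][j]
--     for i in range(len(A)):
--         for j in range(len(A),2*len(A)):
--             if i+len(A)==j:
--                 new[i][j]=1
--             else:
--                 new[i][j]=0
--     return new
-- ===== SOURCE B (Python) =====
-- def matriz_aum_id(A):
--     '''Dada una matriz cuadrada A, retorna la matriz aumentada [A | I]'''
--     n = len(A)
--     e = [1] + [0] * (n - 1)   # one-hot vector, shifted right once per row
--     out = []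
--     for fila in A:
--         out.append([fila[j] for j in range(n)] + e)
--         e = [0] + e[:-1]
--     return out
-- ===== Notes on version B (the rewrite author's own statement) =====
-- stated objective: alternative
-- what changed: Single pass over the rows maintaining a shifting one-hot vector: each output row is the copied left block plus the current one-hot, which is then rotated right by one, eliminating the preallocated zero matrix, the two indexed overwrite passes and the i==j identity test.
import Mathlib
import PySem

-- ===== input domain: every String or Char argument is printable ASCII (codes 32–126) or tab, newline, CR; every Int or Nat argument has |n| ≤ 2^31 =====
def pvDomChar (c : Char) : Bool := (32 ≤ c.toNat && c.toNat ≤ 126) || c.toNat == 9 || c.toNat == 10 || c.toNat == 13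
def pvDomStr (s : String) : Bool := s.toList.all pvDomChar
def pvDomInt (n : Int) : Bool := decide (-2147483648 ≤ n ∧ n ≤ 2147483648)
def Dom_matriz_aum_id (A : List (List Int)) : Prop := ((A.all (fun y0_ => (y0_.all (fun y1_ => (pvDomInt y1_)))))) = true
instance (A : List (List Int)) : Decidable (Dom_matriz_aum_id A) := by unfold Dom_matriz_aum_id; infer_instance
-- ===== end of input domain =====

-- B makes a single pass over the rows keeping a shifting one-hot vector: each output row is the
-- copied left block plus the current one-hot, which is then rotated right — no preallocated zero
-- matrix, no overwrite passes, no i==j test; proved equal on Pre_ (no row shorter than len(A)).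


-- ===== PORT A =====
-- A[i][j] read via pyGetD; exact under Pre_ (every accessed index is then in range)
def pvIdx2 (A : List (List Int)) (i j : Int) : Int :=
  PySem.List.pyGetD (PySem.List.pyGetD A i []) j 0

-- new[i][j] = v (i, j produced by range(...), hence nonnegative and in range)
def pvSet2 (m : List (List Int)) (i j : Int) (v : Int) : List (List Int) :=
  m.modify i.toNat (fun row => row.set j.toNat v)

def matriz_vacia (n m : Int) : List (List Int) :=
  let vacia := (PySem.List.pyRange 0 n 1).foldl (fun acc _ => acc ++ [([] : List Int)]) []
  vacia.map (fun j => (PySem.List.pyRange 0 m 1).foldl (fun jj _ => jj ++ [(0 : Int)]) j)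

def matriz_aum_id (A : List (List Int)) : List (List Int) :=
  let n : Int := A.length
  let new0 := matriz_vacia n (2 * n)
  let new1 := (PySem.List.pyRange 0 n 1).foldl (fun m i =>
      (PySem.List.pyRange 0 n 1).foldl (fun m j => pvSet2 m i j (pvIdx2 A i j)) m) new0
  (PySem.List.pyRange 0 n 1).foldl (fun m i =>
      (PySem.List.pyRange n (2 * n) 1).foldl (fun m j =>
        if i + n == j then pvSet2 m i j 1 else pvSet2 m i j 0) m) new1

-- ===== PORT B =====
-- the loop 'for fila in A: out.append(fila[:n] + e); e = [0] + e[:-1]' as structural recursion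
def pvGo (n : Int) (rows : List (List Int)) (e : List Int) : List (List Int) :=
  match rows with
  | [] => []
  | fila :: rest =>
      (((PySem.List.pyRange 0 n 1).map (fun j => PySem.List.pyGetD fila j 0)) ++ e) ::
        pvGo n rest ((0 : Int) :: PySem.List.slice e none (some (-1)))

def matriz_aum_id_alt (A : List (List Int)) : List (List Int) :=
  let n : Int := A.length
  -- e = [1] + [0]*(n-1)
  pvGo n A ((1 : Int) :: List.replicate (n - 1).toNat (0 : Int))

-- ===== PRECONDITION & SPEC =====
-- Pre_ excludes exactly the inputs on which Python A raises IndexError: some row shorter than len(A).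
def Pre_matriz_aum_id (A : List (List Int)) : Prop :=
  (A.all (fun row => A.length ≤ row.length)) = true
instance (A : List (List Int)) : Decidable (Pre_matriz_aum_id A) := by
  unfold Pre_matriz_aum_id; infer_instance
def pvWitness_matriz_aum_id : List (List Int) := [[1, 2], [3, 4]]

def Spec_matriz_aum_id (A : List (List Int)) (out : List (List Int)) : Prop := out = matriz_aum_id_alt A
instance (A : List (List Int)) (out : List (List Int)) : Decidable (Spec_matriz_aum_id A out) := by unfold Spec_matriz_aum_id; infer_instance

-- ===== CLAIM (what is proved, stated in full; the proofs are below) =====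
def Claim_equal_matriz_aum_id : Prop := ∀ (A : List (List Int)), Dom_matriz_aum_id A → Pre_matriz_aum_id A → Spec_matriz_aum_id A (matriz_aum_id A)

-- ===== LEMMAS AND PROOFS =====

-- a foldl that only appends a constant element
theorem pv_foldl_append_const {α β : Type} (v : α) :
    ∀ (l : List β) (acc : List α),
      l.foldl (fun a _ => a ++ [v]) acc = acc ++ List.replicate l.length v := by
  intro l
  induction l with
  | nil => intro acc; simp
  | cons x xs ih => intro acc; simp [List.foldl_cons, ih, List.replicate_succ]

-- a foldl of modify (i+1) keeps the head and acts on the tail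
theorem pv_foldl_modify_shift {α : Type} (g : Nat → α → α) :
    ∀ (l : List Nat) (h : α) (t : List α),
      l.foldl (fun m i => m.modify (i + 1) (g i)) (h :: t)
        = h :: l.foldl (fun m i => m.modify i (g i)) t := by
  intro l
  induction l with
  | nil => intro h t; rfl
  | cons x xs ih =>
      intro h t
      simp only [List.foldl_cons, List.modify_succ_cons]
      exact ih h _

-- fold of modify i (f i) over range n, started on (range n).map g, is a pointwise map
theorem pv_foldl_modify_map_range {α : Type} :
    ∀ (n : Nat) (f : Nat → α → α) (g : Nat → α),
      (List.range n).foldl (fun m i => m.modify i (f i)) ((List.range n).map g)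
        = (List.range n).map (fun i => f i (g i)) := by
  intro n
  induction n with
  | zero => intro f g; rfl
  | succ n ih =>
      intro f g
      rw [List.range_succ_eq_map, List.map_cons, List.map_map, List.foldl_cons,
        List.modify_zero_cons, List.foldl_map, pv_foldl_modify_shift, List.map_cons, List.map_map]
      exact congrArg _ (ih (fun i => f (i + 1)) (fun k => g (k + 1)))

-- a foldl of set (j+1) keeps the head and acts on the tail
theorem pv_foldl_set_shift {α : Type} (g : Nat → α) :
    ∀ (l : List Nat) (h : α) (t : List α),
      l.foldl (fun r j => r.set (j + 1) (g j)) (h :: t)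
        = h :: l.foldl (fun r j => r.set j (g j)) t := by
  intro l
  induction l with
  | nil => intro h t; rfl
  | cons x xs ih =>
      intro h t
      simp only [List.foldl_cons, List.set_cons_succ]
      exact ih h _

-- fold of set j (g j) over range n overwrites the first n cells
theorem pv_foldl_set_range {α : Type} :
    ∀ (n : Nat) (g : Nat → α) (xs : List α), n ≤ xs.length →
      (List.range n).foldl (fun r j => r.set j (g j)) xs
        = (List.range n).map g ++ xs.drop n := by
  intro n
  induction n with
  | zero => intro g xs _; simp
  | succ n ih =>
      intro g xs hlen
      match xs with
      | [] => simp at hlen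
      | x :: t =>
          rw [List.range_succ_eq_map, List.foldl_cons, List.set_cons_zero, List.foldl_map,
            pv_foldl_set_shift, List.map_cons, List.map_map, List.drop_succ_cons]
          exact congrArg _ (ih (fun j => g (j + 1)) t (by simpa using hlen))

theorem pv_set_append_right {α : Type} (P Q : List α) (j : Nat) (v : α) :
    (P ++ Q).set (P.length + j) v = P ++ Q.set j v := by
  simp

-- fold of set (P.length + j) on P ++ Q leaves P alone
theorem pv_foldl_set_append {α : Type} (g : Nat → α) (P : List α) :
    ∀ (l : List Nat) (Q : List α),
      l.foldl (fun r j => r.set (P.length + j) (g j)) (P ++ Q)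
        = P ++ l.foldl (fun r j => r.set j (g j)) Q := by
  intro l
  induction l with
  | nil => intro Q; rfl
  | cons x xs ih =>
      intro Q
      rw [List.foldl_cons, List.foldl_cons, pv_set_append_right]
      exact ih _

-- pyRange n (2n) 1 as a shifted Nat range
theorem pv_pyRange_upper (n : Nat) :
    PySem.List.pyRange (n : Int) (2 * (n : Int)) 1
      = (List.range n).map (fun (k : Nat) => ((n + k : Nat) : Int)) := by
  rw [PySem.List.pyRange_one]
  have h : ((2 * (n : Int) - n)).toNat = n := by omega
  rw [h]
  exact List.map_congr_left (fun k _ => by push_cast; ring)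

theorem pv_matriz_vacia (n : Nat) :
    matriz_vacia (n : Int) (2 * (n : Int))
      = (List.range n).map (fun _ => List.replicate (2 * n) (0 : Int)) := by
  have h2 : (2 * (n : Int)) = ((2 * n : Nat) : Int) := by push_cast; ring
  rw [matriz_vacia, PySem.List.pyRange_zero_natCast, h2, PySem.List.pyRange_zero_natCast]
  simp only [List.foldl_map]
  rw [show (List.range n).foldl (fun acc _ => acc ++ [([] : List Int)]) []
      = List.replicate n ([] : List Int) from by
        simp [pv_foldl_append_const ([] : List Int) (List.range n) []]]
  have h0 : ∀ j : List Int, (List.range (2 * n)).foldl (fun jj _ => jj ++ [(0 : Int)]) j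
      = j ++ List.replicate (2 * n) 0 := fun j => by
    simp [pv_foldl_append_const (0 : Int) (List.range (2 * n)) j]
  simp [h0, List.map_replicate]

-- inner loop of pass 1, as a modify of row i
theorem pv_body1 (A : List (List Int)) (i : Nat) (n : Nat) : ∀ (m : List (List Int)),
    (List.range n).foldl
      (fun m (j : Nat) => pvSet2 m (i : Int) (j : Int) (pvIdx2 A (i : Int) (j : Int))) m
    = m.modify i (fun row =>
        (List.range n).foldl (fun r j => r.set j ((A.getD i []).getD j 0)) row) := by
  induction n with
  | zero => intro m; exact (List.modify_id i m).symm
  | succ k ih =>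
      intro m
      rw [List.range_succ, List.foldl_append, ih]
      simp [List.foldl_append, pvSet2, pvIdx2, List.modify_modify_eq, Function.comp_def]

-- inner loop of pass 2, as a modify of row i (c = offset of the written cells)
theorem pv_body2 (i c0 c : Nat) (n : Nat) : ∀ (m : List (List Int)),
    (List.range n).foldl
      (fun m (k : Nat) => if (i : Int) + (c0 : Int) == ((c + k : Nat) : Int)
                  then pvSet2 m (i : Int) ((c + k : Nat) : Int) 1
                  else pvSet2 m (i : Int) ((c + k : Nat) : Int) 0) m
    = m.modify i (fun row =>
        (List.range n).foldl
          (fun r k => r.set (c + k) (if i + c0 = c + k then (1 : Int) else 0)) row) := by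
  induction n with
  | zero => intro m; exact (List.modify_id i m).symm
  | succ q ih =>
      intro m
      rw [List.range_succ, List.foldl_append, ih]
      have ht : ((c : Int) + (q : Int)).toNat = c + q := by omega
      by_cases h : i + c0 = c + q
      · simp [h, pvSet2, List.modify_modify_eq, Function.comp_def, List.foldl_append]
        rw [if_pos (by omega), ht]
      · simp [h, pvSet2, List.modify_modify_eq, Function.comp_def, List.foldl_append]
        rw [if_neg (by omega), ht]

-- the closed form both ports reach
def pvRowForm (A : List (List Int)) : List (List Int) :=
  (List.range A.length).map (fun i =>
    (List.range A.length).map (fun j => (A.getD i []).getD j 0)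
    ++ (List.range A.length).map (fun k => if i = k then (1 : Int) else 0))

theorem matriz_aum_id_eval (A : List (List Int)) : matriz_aum_id A = pvRowForm A := by
  rw [matriz_aum_id, pvRowForm]
  set n := A.length with hn
  rw [pv_matriz_vacia, PySem.List.pyRange_zero_natCast, pv_pyRange_upper]
  simp only [List.foldl_map]
  have pass1 :
      (List.range n).foldl (fun m (i : Nat) =>
          (List.range n).foldl
            (fun m (j : Nat) => pvSet2 m (i : Int) (j : Int) (pvIdx2 A (i : Int) (j : Int))) m)
        ((List.range n).map (fun _ => List.replicate (2 * n) (0 : Int)))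
      = (List.range n).map (fun i =>
          (List.range n).map (fun j => (A.getD i []).getD j 0) ++ List.replicate n 0) := by
    rw [PySem.List.foldl_congr_mem _ _
      (fun m (i : Nat) => m.modify i (fun row =>
        (List.range n).foldl (fun r j => r.set j ((A.getD i []).getD j 0)) row)) _
      (fun m i _ => pv_body1 A i n m)]
    rw [pv_foldl_modify_map_range]
    refine List.map_congr_left (fun i _ => ?_)
    rw [pv_foldl_set_range n _ _ (by simp [Nat.two_mul])]
    simp [List.drop_replicate, Nat.two_mul]
  rw [pass1]
  rw [PySem.List.foldl_congr_mem _ _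
    (fun m (i : Nat) => m.modify i (fun row =>
      (List.range n).foldl
        (fun r k => r.set (n + k) (if i + n = n + k then (1 : Int) else 0)) row)) _
    (fun m i _ => pv_body2 i n n n m)]
  rw [pv_foldl_modify_map_range]
  refine List.map_congr_left (fun i _ => ?_)
  have hP : ((List.range n).map (fun j => (A.getD i []).getD j 0)).length = n := by simp
  rw [show (fun (r : List Int) (k : Nat) => r.set (n + k) (if i + n = n + k then (1 : Int) else 0))
      = (fun (r : List Int) (k : Nat) =>
          r.set (((List.range n).map (fun j => (A.getD i []).getD j 0)).length + k)
            (if i + n = n + k then (1 : Int) else 0)) from by rw [hP]]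
  rw [pv_foldl_set_append, pv_foldl_set_range n _ _ (by simp)]
  simp only [List.drop_replicate, Nat.sub_self, List.replicate_zero, List.append_nil]
  exact congrArg _ (List.map_congr_left (fun k _ => by
    by_cases h : i = k
    · rw [if_pos (by omega), if_pos h]
    · rw [if_neg (by omega), if_neg h]))

-- ===== B-side lemmas =====

-- the one-hot vector of length n with the 1 at position i
def pvOnehot (n i : Nat) : List Int :=
  (List.range n).map (fun k => if i = k then (1 : Int) else 0)

-- rotating the one-hot right moves the 1 one place along
theorem pv_onehot_shift (n i : Nat) (hn : 1 ≤ n) :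
    (0 : Int) :: (pvOnehot n i).dropLast = pvOnehot n (i + 1) := by
  apply List.ext_getElem
  · simp [pvOnehot]; omega
  · intro k hk hk'
    match k with
    | 0 => simp [pvOnehot]
    | Nat.succ m =>
        have hm : m < n - 1 := by simp [pvOnehot] at hk; omega
        have hm' : m < n := by omega
        simp only [pvOnehot, List.getElem_cons_succ, List.getElem_dropLast,
          List.getElem_map, List.getElem_range]
        by_cases h : i = m
        · rw [if_pos h, if_pos (by omega)]
        · rw [if_neg h, if_neg (by omega)]

theorem pv_onehot_init (n : Nat) (hn : 1 ≤ n) :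
    (1 : Int) :: List.replicate (n - 1) (0 : Int) = pvOnehot n 0 := by
  apply List.ext_getElem
  · simp [pvOnehot]; omega
  · intro k hk hk'
    match k with
    | 0 => simp [pvOnehot]
    | Nat.succ m =>
        have hm : m < n - 1 := by simp at hk; omega
        simp only [pvOnehot, List.getElem_cons_succ, List.getElem_replicate,
          List.getElem_map, List.getElem_range]
        rw [if_neg (by omega)]

theorem pv_onehot_length (n i : Nat) : (pvOnehot n i).length = n := by simp [pvOnehot]

-- the recursion of pvGo, unrolled: row k gets one-hot i+k
theorem pv_go_eq (n : Int) :
    ∀ (rows : List (List Int)) (i : Nat), 1 ≤ (pvOnehot n.toNat i).length →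
      pvGo n rows (pvOnehot n.toNat i)
        = (List.range rows.length).map (fun k =>
            ((PySem.List.pyRange 0 n 1).map (fun j => PySem.List.pyGetD (rows.getD k []) j 0))
              ++ pvOnehot n.toNat (i + k)) := by
  intro rows
  induction rows with
  | nil => intro i _; rfl
  | cons r rest ih =>
      intro i hlen
      have hn : 1 ≤ n.toNat := by simpa [pv_onehot_length] using hlen
      rw [pvGo, PySem.List.slice_to_neg_one, pv_onehot_shift _ _ hn,
        ih (i + 1) (by simpa [pv_onehot_length] using hn)]
      rw [List.length_cons, List.range_succ_eq_map, List.map_cons, List.map_map]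
      refine congrArg₂ _ (by simp) ?_
      exact List.map_congr_left (fun k _ => by
        simp [Nat.add_assoc, Nat.add_comm 1 k])

theorem matriz_aum_id_alt_eval (A : List (List Int)) :
    matriz_aum_id_alt A = pvRowForm A := by
  rw [matriz_aum_id_alt, pvRowForm]
  match hA : A with
  | [] => rfl
  | a :: As =>
      set n := (a :: As).length with hn
      have hn1 : 1 ≤ n := by simp [hn]
      have htn : ((n : Int)).toNat = n := by omega
      have hinit : (1 : Int) :: List.replicate (((n : Int)) - 1).toNat (0 : Int)
          = pvOnehot ((n : Int)).toNat 0 := by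
        rw [htn, show (((n : Int)) - 1).toNat = n - 1 from by omega]
        exact pv_onehot_init n hn1
      rw [hinit, pv_go_eq _ _ 0 (by rw [pv_onehot_length, htn]; exact hn1)]
      refine List.map_congr_left (fun i _ => ?_)
      rw [PySem.List.pyRange_zero_natCast, htn, List.map_map]
      refine congrArg₂ _ (List.map_congr_left (fun j _ => ?_)) (by simp [pvOnehot])
      simp [PySem.List.pyGetD_natCast, List.getD]

-- ===== VERDICT (by name: the statement is the Claim_ definition above) =====
theorem matriz_aum_id_spec : Claim_equal_matriz_aum_id := by
  intro A _ _
  unfold Spec_matriz_aum_id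
  rw [matriz_aum_id_eval, matriz_aum_id_alt_eval A]
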